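-- pv_equiv track=rewrite | github.com/jmromeroes/competitive-programming | AlgorithmsStrings/special-palindrome-again.py | substrCount2
-- ===== SOURCE A (Python) =====
-- def substrCount2(n, s):
--     count = 0
--     for i in range(n - 1):
--         for j in range(i + 1, n):
--             curr = i
--             shouldBeEqual = False
--             if j - curr % 2 == 0:
--                 shouldBeEqual = True
--             c = s[curr]
--             right = True
--             while curr < j:
--                 if s[curr] != c:
--                     if curr != (j - i // 2):
--                         right = False
--                         break
--                 curr = curr + 1
--             if right:
--                 count = count + 1
--     return count + 2
-- ===== SOURCE B (Python) =====
-- def substrCount2(n, s):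
--     # Per-start incremental scan: track mismatch count and first mismatch
--     # position instead of rescanning the substring for every (i, j).
--     count = 2
--     for i in range(n - 1):
--         c = s[i]
--         mc = 0   # mismatches in s[i:j-1]
--         mp = -1  # position of the first mismatch
--         for j in range(i + 1, n):
--             if s[j - 1] != c:
--                 mc += 1
--                 if mc == 1:
--                     mp = j - 1
--                 else:
--                     break
--             if mc == 0 or mp == j - i // 2:
--                 count += 1
--     return count
-- ===== Notes on version B (the rewrite author's own statement) =====
-- stated objective: faster
-- what changed: Replaces A's O(n^3) per-pair rescans (re-scanning s[i:j] from scratch for every (i,j)) by one incremental O(n) scan per start i that tracks the mismatch count and first mismatch position, counting j when there is no mismatch or the single mismatch sits at the excused index j - i//2, and breaking at the second mismatch.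
import Mathlib
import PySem

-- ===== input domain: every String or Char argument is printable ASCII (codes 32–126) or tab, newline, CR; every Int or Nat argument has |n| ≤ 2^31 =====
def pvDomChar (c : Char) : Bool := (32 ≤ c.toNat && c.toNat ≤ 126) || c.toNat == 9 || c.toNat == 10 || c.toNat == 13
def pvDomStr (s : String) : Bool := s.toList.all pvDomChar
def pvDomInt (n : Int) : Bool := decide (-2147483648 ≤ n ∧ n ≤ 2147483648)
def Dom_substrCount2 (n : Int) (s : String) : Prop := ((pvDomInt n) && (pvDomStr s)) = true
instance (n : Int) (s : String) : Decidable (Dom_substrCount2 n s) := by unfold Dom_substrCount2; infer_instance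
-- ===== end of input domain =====

-- B replaces A's per-pair rescans by one incremental mismatch-tracking scan per start index (same return value; measurably faster).

-- ===== PORT A =====
-- A's inner while loop: curr runs while curr < j (fuel = (j - curr).toNat); returns `right`.
def pvLoopA (cs : List Char) (c : Char) (i j : Int) : Nat → Int → Bool
  | 0, _ => true
  | fuel+1, curr =>
    if PySem.List.pyGetD cs curr ' ' ≠ c then
      if curr ≠ j - PySem.Int.floordiv i 2 then false
      else pvLoopA cs c i j fuel (curr+1)
    else pvLoopA cs c i j fuel (curr+1)

def substrCount2 (n : Int) (s : String) : Int :=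
  let cs := s.toList
  let count : Int :=
    (PySem.List.pyRange 0 (n-1) 1).foldl (fun count i =>
      (PySem.List.pyRange (i+1) n 1).foldl (fun count j =>
        -- shouldBeEqual in the Python is dead (never read); not carried
        let c := PySem.List.pyGetD cs i ' '
        let right := pvLoopA cs c i j (j - i).toNat i
        if right then count + 1 else count) count) 0
  count + 2

-- ===== PORT B =====
-- B's inner loop over j (fuel = (n - j).toNat); mc = mismatch count so far, mp = first mismatch position.
def pvLoopB (cs : List Char) (c : Char) (i : Int) : Nat → Int → Int → Int → Int → Int
  | 0, _, _, _, count => count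
  | fuel+1, j, mc, mp, count =>
    if PySem.List.pyGetD cs (j-1) ' ' ≠ c then
      if mc + 1 = 1 then
        if mc + 1 = 0 ∨ j - 1 = j - PySem.Int.floordiv i 2 then
          pvLoopB cs c i fuel (j+1) (mc+1) (j-1) (count+1)
        else pvLoopB cs c i fuel (j+1) (mc+1) (j-1) count
      else count   -- break
    else
      if mc = 0 ∨ mp = j - PySem.Int.floordiv i 2 then
        pvLoopB cs c i fuel (j+1) mc mp (count+1)
      else pvLoopB cs c i fuel (j+1) mc mp count

def substrCount2_alt (n : Int) (s : String) : Int :=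
  let cs := s.toList
  (PySem.List.pyRange 0 (n-1) 1).foldl (fun count i =>
    pvLoopB cs (PySem.List.pyGetD cs i ' ') i (n - (i+1)).toNat (i+1) 0 (-1) count) 2

-- ===== PRECONDITION & SPEC =====
-- Pre_ excludes exactly the inputs where the Python A raises IndexError (it reads s[n-2] when n ≥ 2).
def Pre_substrCount2 (n : Int) (s : String) : Prop := n ≤ (s.toList.length : Int) + 1
instance (n : Int) (s : String) : Decidable (Pre_substrCount2 n s) := by unfold Pre_substrCount2; infer_instance
def pvWitness_substrCount2 : Int × String := (4, "aaba")

def Spec_substrCount2 (n : Int) (s : String) (out : Int) : Prop := out = substrCount2_alt n s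
instance (n : Int) (s : String) (out : Int) : Decidable (Spec_substrCount2 n s out) := by unfold Spec_substrCount2; infer_instance

-- ===== CLAIM (what is proved, stated in full; the proofs are below) =====
def Claim_equal_substrCount2 : Prop := ∀ (n : Int) (s : String), Dom_substrCount2 n s → Pre_substrCount2 n s → Spec_substrCount2 n s (substrCount2 n s)

-- ===== LEMMAS AND PROOFS =====

-- A ∀-over-Nat-offsets statement is the same as a ∀-over-the-Int-interval statement.
lemma pvForall_offset_iff (Q : Int → Prop) (a b : Int) :
    (∀ k : Nat, k < (b - a).toNat → Q (a + k)) ↔ (∀ p : Int, a ≤ p → p < b → Q p) := by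
  constructor
  · intro H p h1 h2
    have hp : a + ((p - a).toNat : Int) = p := by omega
    have := H (p - a).toNat (by omega)
    rwa [hp] at this
  · intro H k hk
    exact H (a + k) (by omega) (by omega)

-- A's while loop succeeds iff every scanned position holds c or is the excused index j - i//2.
lemma pvLoopA_eq_true_iff (cs : List Char) (c : Char) (i j : Int) :
    ∀ (fuel : Nat) (curr : Int),
      pvLoopA cs c i j fuel curr = true ↔
        ∀ k : Nat, k < fuel →
          (PySem.List.pyGetD cs (curr + k) ' ' = c ∨ curr + k = j - PySem.Int.floordiv i 2) := by
  intro fuel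
  induction fuel with
  | zero => intro curr; simp [pvLoopA]
  | succ f ih =>
    intro curr
    have hshift : (∀ k : Nat, k < f + 1 →
          (PySem.List.pyGetD cs (curr + k) ' ' = c ∨ curr + k = j - PySem.Int.floordiv i 2)) ↔
        ((PySem.List.pyGetD cs curr ' ' = c ∨ curr = j - PySem.Int.floordiv i 2) ∧
         ∀ k : Nat, k < f →
          (PySem.List.pyGetD cs (curr + 1 + k) ' ' = c ∨ curr + 1 + k = j - PySem.Int.floordiv i 2)) := by
      constructor
      · intro H
        refine ⟨by simpa using H 0 (by omega), fun k hk => ?_⟩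
        have := H (k + 1) (by omega)
        have he : curr + ((k : Int) + 1) = curr + 1 + k := by ring
        simpa [he] using this
      · rintro ⟨h0, H⟩ k hk
        cases k with
        | zero => simpa using h0
        | succ k =>
          have := H k (by omega)
          have he : curr + 1 + (k : Int) = curr + ((k : Int) + 1) := by ring
          simpa [he] using this
    rw [hshift]
    show (if PySem.List.pyGetD cs curr ' ' ≠ c then _ else _) = true ↔ _
    by_cases h : PySem.List.pyGetD cs curr ' ' = c
    · rw [if_neg (by simpa using h), ih]
      exact ⟨fun H => ⟨Or.inl h, H⟩, fun H => H.2⟩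
    · rw [if_pos h]
      by_cases hm : curr = j - PySem.Int.floordiv i 2
      · rw [if_neg (by simpa using hm), ih]
        exact ⟨fun H => ⟨Or.inr hm, H⟩, fun H => H.2⟩
      · rw [if_pos hm]
        simp only [Bool.false_eq_true, false_iff]
        rintro ⟨h0 | h0, -⟩
        · exact h h0
        · exact hm h0

-- folding an if-step whose condition is false on every element is the identity
lemma pvFoldl_if_false (g : Int → Bool) :
    ∀ (l : List Int), (∀ x ∈ l, g x = false) → ∀ init : Int,
      l.foldl (fun acc x => if g x then acc + 1 else acc) init = init := by
  intro l
  induction l with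
  | nil => intro _ init; rfl
  | cons x xs ih =>
    intro h init
    have hx := h x (by simp)
    simp only [List.foldl_cons, hx]
    exact ih (fun y hy => h y (by simp [hy])) init

-- a fold whose step is translation-invariant commutes with + d
lemma pvFoldl_trans (F : Int → Int → Int) (h : ∀ (a d : Int) (x : Int), F (a + d) x = F a x + d) :
    ∀ (l : List Int) (a d : Int), l.foldl F (a + d) = l.foldl F a + d := by
  intro l
  induction l with
  | nil => intro a d; rfl
  | cons x xs ih =>
    intro a d
    simp only [List.foldl_cons, h a d x]
    exact ih (F a x) d

lemma pvStep_trans (g : Int → Bool) (a d x : Int) :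
    (if g x then (a + d) + 1 else a + d) = (if g x then a + 1 else a) + d := by
  split <;> ring

-- Invariant for B's loop state describing the interval [i, j-1).
def pvInv (cs : List Char) (c : Char) (i j mc mp : Int) : Prop :=
  (mc = 0 ∧ ∀ p : Int, i ≤ p → p < j - 1 → PySem.List.pyGetD cs p ' ' = c) ∨
  (mc = 1 ∧ i ≤ mp ∧ mp < j - 1 ∧ PySem.List.pyGetD cs mp ' ' ≠ c ∧
    ∀ p : Int, i ≤ p → p < j - 1 → p ≠ mp → PySem.List.pyGetD cs p ' ' = c)

-- B's loop computes exactly A's inner fold, given the invariant.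
lemma pvLoopB_eq_foldA (cs : List Char) (c : Char) (i n : Int) :
    ∀ (fuel : Nat), ∀ (j mc mp count : Int), fuel = (n - j).toNat → i < j →
      pvInv cs c i j mc mp →
      pvLoopB cs c i fuel j mc mp count =
        (PySem.List.pyRange j n 1).foldl (fun count j =>
          if pvLoopA cs c i j (j - i).toNat i then count + 1 else count) count := by
  intro fuel
  induction fuel with
  | zero =>
    intro j mc mp count hfuel hij hinv
    rw [PySem.List.pyRange_one_eq_nil (by omega)]
    rfl
  | succ f ih =>
    intro j mc mp count hfuel hij hinv
    have hjn : j < n := by omega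
    rw [PySem.List.pyRange_one_cons hjn]
    simp only [List.foldl_cons]
    have hOk : pvLoopA cs c i j (j - i).toNat i = true ↔
        (∀ p : Int, i ≤ p → p < j → (PySem.List.pyGetD cs p ' ' = c ∨ p = j - PySem.Int.floordiv i 2)) :=
      (pvLoopA_eq_true_iff cs c i j (j - i).toNat i).trans
        (pvForall_offset_iff (fun p => PySem.List.pyGetD cs p ' ' = c ∨ p = j - PySem.Int.floordiv i 2) i j)
    show (if PySem.List.pyGetD cs (j - 1) ' ' ≠ c then _ else _) = _
    by_cases hnew : PySem.List.pyGetD cs (j - 1) ' ' = c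
    · rw [if_neg (by simpa using hnew)]
      rcases hinv with ⟨hmc, hall⟩ | ⟨hmc, hmp1, hmp2, hbad, hall⟩
      · -- no mismatch so far: the substring is constant, both count this j
        have hok : pvLoopA cs c i j (j - i).toNat i = true := by
          rw [hOk]; intro p h1 h2
          by_cases hpj : p = j - 1
          · exact Or.inl (hpj ▸ hnew)
          · exact Or.inl (hall p h1 (by omega))
        rw [if_pos (Or.inl hmc), if_pos hok]
        exact ih (j + 1) mc mp (count + 1) (by omega) (by omega)
          (Or.inl ⟨hmc, fun p h1 h2 => by
            by_cases hpj : p = j - 1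
            · exact hpj ▸ hnew
            · exact hall p h1 (by omega)⟩)
      · -- one mismatch at mp: this j is valid iff mp is the excused index
        have hok : pvLoopA cs c i j (j - i).toNat i = true ↔ mp = j - PySem.Int.floordiv i 2 := by
          rw [hOk]
          constructor
          · intro H
            rcases H mp (by omega) (by omega) with h | h
            · exact absurd h hbad
            · exact h
          · intro hm p h1 h2
            by_cases hpm : p = mp
            · exact Or.inr (hpm ▸ hm)
            · by_cases hpj : p = j - 1
              · exact Or.inl (hpj ▸ hnew)
              · exact Or.inl (hall p h1 (by omega) hpm)
        have hinv' : pvInv cs c i (j + 1) mc mp :=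
          Or.inr ⟨hmc, hmp1, by omega, hbad, fun p h1 h2 hpm => by
            by_cases hpj : p = j - 1
            · exact hpj ▸ hnew
            · exact hall p h1 (by omega) hpm⟩
        by_cases hm : mp = j - PySem.Int.floordiv i 2
        · rw [if_pos (Or.inr hm), if_pos (hok.mpr hm)]
          exact ih (j + 1) mc mp (count + 1) (by omega) (by omega) hinv'
        · rw [if_neg (fun hc => hc.elim (fun h0 => by omega) hm),
              if_neg (fun ht => hm (hok.mp ht))]
          exact ih (j + 1) mc mp count (by omega) (by omega) hinv'
    · rw [if_pos hnew]
      rcases hinv with ⟨hmc, hall⟩ | ⟨hmc, hmp1, hmp2, hbad, hall⟩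
      · -- first mismatch, at position j-1
        have hok : pvLoopA cs c i j (j - i).toNat i = true ↔ j - 1 = j - PySem.Int.floordiv i 2 := by
          rw [hOk]
          constructor
          · intro H
            rcases H (j - 1) (by omega) (by omega) with h | h
            · exact absurd h hnew
            · exact h
          · intro hm p h1 h2
            by_cases hpj : p = j - 1
            · exact Or.inr (hpj ▸ hm)
            · exact Or.inl (hall p h1 (by omega))
        have hinv' : pvInv cs c i (j + 1) (mc + 1) (j - 1) :=
          Or.inr ⟨by omega, by omega, by omega, hnew, fun p h1 h2 hpj => hall p h1 (by omega)⟩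
        rw [if_pos (by omega : mc + 1 = 1)]
        by_cases hm : j - 1 = j - PySem.Int.floordiv i 2
        · rw [if_pos (Or.inr hm), if_pos (hok.mpr hm)]
          exact ih (j + 1) (mc + 1) (j - 1) (count + 1) (by omega) (by omega) hinv'
        · rw [if_neg (fun hc => hc.elim (fun h0 => by omega) hm),
              if_neg (fun ht => hm (hok.mp ht))]
          exact ih (j + 1) (mc + 1) (j - 1) count (by omega) (by omega) hinv'
      · -- second mismatch: B breaks; A's check fails on this and every later j'
        rw [if_neg (by omega : ¬ (mc + 1 = 1))]
        have hfail : ∀ x : Int, j ≤ x → x < n → pvLoopA cs c i x (x - i).toNat i = false := by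
          intro x hx1 hx2
          rw [Bool.eq_false_iff, ne_eq,
              (pvLoopA_eq_true_iff cs c i x (x - i).toNat i).trans
                (pvForall_offset_iff (fun p => PySem.List.pyGetD cs p ' ' = c ∨ p = x - PySem.Int.floordiv i 2) i x)]
          intro H
          rcases H mp (by omega) (by omega) with h | h
          · exact hbad h
          rcases H (j - 1) (by omega) (by omega) with h' | h'
          · exact hnew h'
          omega
        rw [if_neg (by simp [hfail j (le_refl j) hjn])]
        exact (pvFoldl_if_false (fun x => pvLoopA cs c i x (x - i).toNat i)
          (PySem.List.pyRange (j + 1) n 1)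
          (fun x hx => by
            rw [PySem.List.mem_pyRange_one] at hx
            exact hfail x (by omega) hx.2) count).symm

theorem substrCount2_spec_aux : ∀ (n : Int) (s : String), substrCount2 n s = substrCount2_alt n s := by
  intro n s
  unfold substrCount2 substrCount2_alt
  set cs := s.toList with hcs
  set F : Int → Int → Int := fun count i =>
    (PySem.List.pyRange (i+1) n 1).foldl (fun count j =>
      let c := PySem.List.pyGetD cs i ' '
      let right := pvLoopA cs c i j (j - i).toNat i
      if right then count + 1 else count) count with hF
  have htrans : ∀ (a d x : Int), F (a + d) x = F a x + d := by
    intro a d x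
    exact pvFoldl_trans _ (fun a d j => pvStep_trans
      (fun j => pvLoopA cs (PySem.List.pyGetD cs x ' ') x j (j - x).toNat x) a d j) _ a d
  have hFG : ∀ (count i : Int), F count i =
      pvLoopB cs (PySem.List.pyGetD cs i ' ') i (n - (i+1)).toNat (i+1) 0 (-1) count := by
    intro count i
    rw [hF]
    exact (pvLoopB_eq_foldA cs (PySem.List.pyGetD cs i ' ') i n _ (i+1) 0 (-1) count rfl
      (by omega) (Or.inl ⟨rfl, fun p h1 h2 => by omega⟩)).symm
  have hcongr : ∀ (l : List Int) (init : Int),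
      l.foldl F init = l.foldl (fun count i =>
        pvLoopB cs (PySem.List.pyGetD cs i ' ') i (n - (i+1)).toNat (i+1) 0 (-1) count) init := by
    intro l
    induction l with
    | nil => intro init; rfl
    | cons x xs ih => intro init; simp only [List.foldl_cons, hFG]; exact ih _
  calc (PySem.List.pyRange 0 (n-1) 1).foldl F 0 + 2
      = (PySem.List.pyRange 0 (n-1) 1).foldl F (0 + 2) := by
        rw [pvFoldl_trans F htrans]
    _ = (PySem.List.pyRange 0 (n-1) 1).foldl (fun count i =>
          pvLoopB cs (PySem.List.pyGetD cs i ' ') i (n - (i+1)).toNat (i+1) 0 (-1) count) 2 := by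
        rw [hcongr]; norm_num

-- ===== VERDICT (by name: the statement is the Claim_ definition above) =====
theorem substrCount2_spec : Claim_equal_substrCount2 := by
  intro n s _ _
  unfold Spec_substrCount2
  exact substrCount2_spec_aux n s
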